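-- pv_equiv track=rewrite | github.com/yourhonor1996/Learning-To-Code-And-ML | Code Wariors Katas/Kata_17.py | is_decrementing
-- ===== SOURCE A (Python) =====
-- def is_decrementing(n:int):
--     b = str(n)
--     result = False
--     count = 0
--     if(b[-1]=='0'):
--         b = b[0:-1]
--     for i in range(1,len(b)):
--         if (int(b[i]) == int(b[i-1])-1):
--             count += 1
--     if (count == len(b)-1):
--         result = True
--     return result
-- ===== SOURCE B (Python) =====
-- def is_decrementing(n: int):
--     b = str(n)
--     if b[-1] == '0':
--         b = b[:-1]
--     if not b:
--         return False
--     start = int(b[0])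
--     expected = ''.join(str(start - i) for i in range(len(b)))
--     return b == expected
-- ===== Notes on version B (the rewrite author's own statement) =====
-- stated objective: alternative
-- what changed: A tallies adjacent digit pairs that decrement and compares the tally to len-1; B constructs the canonical decreasing string starting from the first digit and does a single string equality comparison.
import Mathlib
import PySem

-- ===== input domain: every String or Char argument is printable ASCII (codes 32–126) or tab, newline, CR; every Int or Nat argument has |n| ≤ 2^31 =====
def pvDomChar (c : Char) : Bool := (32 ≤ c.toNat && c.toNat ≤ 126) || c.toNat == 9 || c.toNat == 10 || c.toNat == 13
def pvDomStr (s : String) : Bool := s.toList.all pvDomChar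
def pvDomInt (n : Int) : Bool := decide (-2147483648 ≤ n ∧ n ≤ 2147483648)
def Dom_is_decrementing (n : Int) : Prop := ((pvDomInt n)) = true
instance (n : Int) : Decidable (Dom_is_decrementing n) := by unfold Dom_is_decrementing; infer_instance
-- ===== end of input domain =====

-- B rebuilds the canonical decreasing digit string once and compares it for equality,
-- instead of A's pairwise-decrement tally; return values proved equal for all n ≥ 0.

-- ===== PORT A =====
-- int(b[i]) is ported as (PySem.Int.ofChars? [c]).getD 0: exact wherever Python's int()
-- succeeds; Pre_ (0 ≤ n) excludes the '-' character, on which Python raises ValueError.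
-- b[-1] is ported with pyGetD (str(n) is never empty, so the default is never read).
def is_decrementing (n : Int) : Bool :=
  let b0 := PySem.Int.toChars n
  let b := if PySem.List.pyGetD b0 (-1) ' ' = '0'
             then PySem.List.slice b0 (some 0) (some (-1)) else b0
  let count : Int := (PySem.List.pyRange 1 (b.length : Int) 1).foldl
    (fun count i =>
      if (PySem.Int.ofChars? [PySem.List.pyGetD b i ' ']).getD 0
           = (PySem.Int.ofChars? [PySem.List.pyGetD b (i - 1) ' ']).getD 0 - 1
        then count + 1 else count) 0
  if count = (b.length : Int) - 1 then true else false

-- ===== PORT B =====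
def is_decrementing_alt (n : Int) : Bool :=
  let b0 := PySem.Int.toChars n
  let b := if PySem.List.pyGetD b0 (-1) ' ' = '0'
             then PySem.List.slice b0 none (some (-1)) else b0
  if b = [] then false
  else
    let start := (PySem.Int.ofChars? [PySem.List.pyGetD b 0 ' ']).getD 0
    let expected := ((PySem.List.pyRange 0 (b.length : Int) 1).map
        (fun i => PySem.Int.toChars (start - i))).flatten
    b == expected

-- ===== PRECONDITION & SPEC =====
-- Pre_ excludes exactly the negative n: there Python's A raises ValueError on int('-')
-- (and B raises the same ValueError on int(b[0])).
def Pre_is_decrementing (n : Int) : Prop := 0 ≤ n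
instance (n : Int) : Decidable (Pre_is_decrementing n) := by unfold Pre_is_decrementing; infer_instance
def pvWitness_is_decrementing : Int := 321

def Spec_is_decrementing (n : Int) (out : Bool) : Prop := out = is_decrementing_alt n
instance (n : Int) (out : Bool) : Decidable (Spec_is_decrementing n out) := by unfold Spec_is_decrementing; infer_instance

-- ===== CLAIM (what is proved, stated in full; the proofs are below) =====
def Claim_equal_is_decrementing : Prop := ∀ (n : Int), Dom_is_decrementing n → Pre_is_decrementing n → Spec_is_decrementing n (is_decrementing n)

-- ===== LEMMAS AND PROOFS =====

def pvVal (c : Char) : Int := (PySem.Int.ofChars? [c]).getD 0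
abbrev pvDigitC (c : Char) : Prop := c ∈ ['0','1','2','3','4','5','6','7','8','9']

theorem pv_toDigitsCore_succ (f n : Nat) (ds : List Char) :
    Nat.toDigitsCore 10 (f + 1) n ds =
      if n / 10 = 0 then Nat.digitChar (n % 10) :: ds
      else Nat.toDigitsCore 10 f (n / 10) (Nat.digitChar (n % 10) :: ds) := rfl

theorem pv_digitChar_digit {k : Nat} (h : k < 10) : pvDigitC (Nat.digitChar k) := by
  interval_cases k <;> decide

theorem pv_toDigitsCore_digit : ∀ (f n : Nat) (ds : List Char), (∀ c ∈ ds, pvDigitC c) →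
    ∀ c ∈ Nat.toDigitsCore 10 f n ds, pvDigitC c := by
  intro f
  induction f with
  | zero => intro n ds h; simpa [Nat.toDigitsCore] using h
  | succ f ih =>
    intro n ds h c hc
    rw [pv_toDigitsCore_succ] at hc
    have hcons : ∀ x ∈ Nat.digitChar (n % 10) :: ds, pvDigitC x := by
      intro x hx
      rw [List.mem_cons] at hx
      rcases hx with rfl | hx
      · exact pv_digitChar_digit (Nat.mod_lt _ (by norm_num))
      · exact h _ hx
    split at hc
    · exact hcons _ hc
    · exact ih _ _ hcons c hc

theorem pv_toDigitsCore_len : ∀ (f n : Nat) (ds : List Char),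
    ds.length + 1 ≤ (Nat.toDigitsCore 10 (f + 1) n ds).length := by
  intro f
  induction f with
  | zero => intro n ds; rw [pv_toDigitsCore_succ]; split <;> simp [Nat.toDigitsCore]
  | succ f ih =>
    intro n ds
    rw [pv_toDigitsCore_succ]
    split
    · simp
    · exact le_trans (by simp) (ih _ (_ :: ds))

theorem pv_toChars_ne_nil (d : Int) : PySem.Int.toChars d ≠ [] := by
  unfold PySem.Int.toChars
  split
  · simp
  · unfold Nat.toDigits
    intro h
    have := pv_toDigitsCore_len d.toNat d.toNat []
    rw [h] at this
    simp at this

theorem pv_toChars_digit {d : Int} (h : 0 ≤ d) : ∀ c ∈ PySem.Int.toChars d, pvDigitC c := by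
  unfold PySem.Int.toChars
  rw [if_neg (by omega)]
  exact pv_toDigitsCore_digit _ _ [] (by simp)

theorem pv_digit_cases {c : Char} (h : pvDigitC c) :
    c = '0' ∨ c = '1' ∨ c = '2' ∨ c = '3' ∨ c = '4' ∨ c = '5' ∨ c = '6' ∨ c = '7' ∨ c = '8' ∨ c = '9' := by
  simpa [pvDigitC] using h

theorem pv_toChars_val {c : Char} (h : pvDigitC c) : PySem.Int.toChars (pvVal c) = [c] := by
  rcases pv_digit_cases h with rfl|rfl|rfl|rfl|rfl|rfl|rfl|rfl|rfl|rfl <;> decide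

theorem pv_toChars_big {d : Int} (h : 10 ≤ d) : 2 ≤ (PySem.Int.toChars d).length := by
  unfold PySem.Int.toChars
  rw [if_neg (by omega)]
  unfold Nat.toDigits
  obtain ⟨m, hm⟩ : ∃ m, d.toNat = (m + 1) + 1 := ⟨d.toNat - 2, by omega⟩
  have hm8 : 8 ≤ m := by omega
  rw [hm, pv_toDigitsCore_succ, if_neg (by omega)]
  calc (2:Nat) = [Nat.digitChar ((m + 1 + 1) % 10)].length + 1 := by simp
    _ ≤ _ := pv_toDigitsCore_len (m+1) _ _

theorem pv_singleton_val {d : Int} {c : Char} (h : PySem.Int.toChars d = [c]) : pvVal c = d := by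
  by_cases hneg : d < 0
  · exfalso
    unfold PySem.Int.toChars at h
    rw [if_pos hneg] at h
    simp only [List.cons.injEq] at h
    have := pv_toDigitsCore_len d.natAbs d.natAbs []
    rw [show Nat.toDigits 10 d.natAbs = Nat.toDigitsCore 10 (d.natAbs + 1) d.natAbs [] from rfl] at h
    rw [h.2] at this
    simp at this
  · by_cases h9 : d ≤ 9
    · have h0 : 0 ≤ d := by omega
      have hc : c = (PySem.Int.toChars d).getD 0 ' ' := by rw [h]; rfl
      subst hc
      interval_cases d <;> decide
    · exfalso
      have := pv_toChars_big (d := d) (by omega)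
      rw [h] at this
      simp at this

def pvP (b : List Char) : Prop :=
  ∀ k : Nat, k < b.length → pvVal (b.getD k ' ') = pvVal (b.getD 0 ' ') - k

theorem pv_Q_iff_P (b : List Char) :
    (∀ k : Nat, k + 1 < b.length → pvVal (b.getD (k + 1) ' ') = pvVal (b.getD k ' ') - 1)
      ↔ pvP b := by
  constructor
  · intro h k
    induction k with
    | zero => intro _; simp
    | succ k ih =>
      intro hk
      have h1 := ih (by omega)
      have h2 := h k (by omega)
      rw [h2, h1]
      push_cast
      ring
  · intro hP k hk
    have ha := hP (k + 1) hk
    have hb := hP k (by omega)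
    rw [ha, hb]
    push_cast
    ring

theorem pv_flatten_len_ge : ∀ (ps : List (List Char)), (∀ p ∈ ps, p ≠ []) →
    ps.length ≤ ps.flatten.length := by
  intro ps
  induction ps with
  | nil => simp
  | cons p ps ih =>
    intro h
    have hp : p ≠ [] := h p (by simp)
    have : 1 ≤ p.length := List.length_pos_iff.mpr hp
    have := ih (fun q hq => h q (by simp [hq]))
    simp only [List.flatten_cons, List.length_append, List.length_cons]
    omega

theorem pv_pieces_singleton : ∀ (ps : List (List Char)), (∀ p ∈ ps, p ≠ []) →
    ps.flatten.length = ps.length → ps = ps.flatten.map (fun x => [x]) := by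
  intro ps
  induction ps with
  | nil => simp
  | cons p ps ih =>
    intro h hlen
    have hp : p ≠ [] := h p (by simp)
    have hp1 : 1 ≤ p.length := List.length_pos_iff.mpr hp
    have hge := pv_flatten_len_ge ps (fun q hq => h q (by simp [hq]))
    simp only [List.flatten_cons, List.length_append, List.length_cons] at hlen
    have hpl : p.length = 1 := by omega
    obtain ⟨a, rfl⟩ := List.length_eq_one_iff.mp hpl
    have := ih (fun q hq => h q (by simp [hq])) (by omega)
    simp only [List.flatten_cons, List.singleton_append, List.map_cons]
    exact List.cons_eq_cons.mpr ⟨rfl, this⟩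

theorem pv_getD_mem (b : List Char) (k : Nat) (h : k < b.length) : b.getD k ' ' ∈ b := by
  rw [List.getD_eq_getElem b ' ' h]; exact List.getElem_mem h

theorem pv_flatten_singleton (l : List Char) : (l.map (fun x => [x])).flatten = l := by
  induction l <;> simp_all

theorem pv_B_iff (b : List Char) (hdig : ∀ c ∈ b, pvDigitC c) :
    (b = ((PySem.List.pyRange 0 (b.length : Int) 1).map
        (fun i => PySem.Int.toChars ((PySem.Int.ofChars? [PySem.List.pyGetD b 0 ' ']).getD 0 - i))).flatten)
      ↔ pvP b := by
  have hexp : ((PySem.List.pyRange 0 (b.length : Int) 1).map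
        (fun i => PySem.Int.toChars ((PySem.Int.ofChars? [PySem.List.pyGetD b 0 ' ']).getD 0 - i))).flatten
      = ((List.range b.length).map
        (fun k : Nat => PySem.Int.toChars (pvVal (b.getD 0 ' ') - (k : Int)))).flatten := by
    rw [PySem.List.pyRange_zero_natCast, List.map_map]
    simp only [Function.comp_def, pvVal, PySem.List.pyGetD_zero]
  rw [hexp]
  constructor
  · intro h k hk
    have hpsne : ∀ p ∈ (List.range b.length).map
        (fun k : Nat => PySem.Int.toChars (pvVal (b.getD 0 ' ') - (k : Int))), p ≠ [] := by
      intro p hp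
      rw [List.mem_map] at hp
      obtain ⟨j, _, rfl⟩ := hp
      exact pv_toChars_ne_nil _
    have hsing := pv_pieces_singleton _ hpsne (by rw [← h]; simp)
    rw [← h] at hsing
    have hentry := congrArg (fun l => l[k]?) hsing
    simp only [List.getElem?_map, List.getElem?_range, hk, List.getElem?_eq_getElem hk,
      Option.map_some] at hentry
    rw [List.getD_eq_getElem b ' ' hk]
    have := pv_singleton_val (d := pvVal (b.getD 0 ' ') - (k : Int)) (c := b[k]) ?_
    · omega
    · simpa using hentry
  · intro hP
    have hcong : ∀ k ∈ List.range b.length,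
        PySem.Int.toChars (pvVal (b.getD 0 ' ') - (k : Int)) = [b.getD k ' '] := by
      intro k hk
      rw [List.mem_range] at hk
      rw [show pvVal (b.getD 0 ' ') - (k : Int) = pvVal (b.getD k ' ') from (hP k hk).symm]
      exact pv_toChars_val (hdig _ (pv_getD_mem b k hk))
    rw [List.map_congr_left hcong]
    rw [show (List.range b.length).map (fun k => [b.getD k ' ']) = b.map (fun x => [x]) from ?_]
    · exact (pv_flatten_singleton b).symm
    · apply List.ext_getElem
      · simp
      · intro i h1 h2
        simp only [List.getElem_map, List.getElem_range]
        rw [List.getD_eq_getElem b ' ' (by simpa using h1)]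

theorem pv_A_iff (b : List Char) (hne : b ≠ []) :
    (((PySem.List.pyRange 1 (b.length : Int) 1).foldl
      (fun count i =>
        if (PySem.Int.ofChars? [PySem.List.pyGetD b i ' ']).getD 0
             = (PySem.Int.ofChars? [PySem.List.pyGetD b (i - 1) ' ']).getD 0 - 1
          then count + 1 else count) (0 : Int))
      = (b.length : Int) - 1) ↔ pvP b := by
  have hlen : 1 ≤ b.length := List.length_pos_iff.mpr hne
  rw [show (fun (count : Int) i =>
        if (PySem.Int.ofChars? [PySem.List.pyGetD b i ' ']).getD 0
             = (PySem.Int.ofChars? [PySem.List.pyGetD b (i - 1) ' ']).getD 0 - 1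
          then count + 1 else count)
      = (fun (count : Int) i =>
        if (fun i : Int => decide ((PySem.Int.ofChars? [PySem.List.pyGetD b i ' ']).getD 0
             = (PySem.Int.ofChars? [PySem.List.pyGetD b (i - 1) ' ']).getD 0 - 1)) i = true
          then count + 1 else count) from by funext count i; simp]
  rw [PySem.List.foldl_count_if]
  have hcle := List.countP_le_length
    (p := fun i : Int => decide ((PySem.Int.ofChars? [PySem.List.pyGetD b i ' ']).getD 0
             = (PySem.Int.ofChars? [PySem.List.pyGetD b (i - 1) ' ']).getD 0 - 1))
    (l := PySem.List.pyRange 1 (b.length : Int) 1)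
  have hlp := PySem.List.length_pyRange_one 1 (b.length : Int)
  have hall : ∀ k : Nat, k + 1 < b.length →
      (((PySem.Int.ofChars? [PySem.List.pyGetD b ((k : Int) + 1) ' ']).getD 0
          = (PySem.Int.ofChars? [PySem.List.pyGetD b (((k : Int) + 1) - 1) ' ']).getD 0 - 1)
        ↔ (pvVal (b.getD (k + 1) ' ') = pvVal (b.getD k ' ') - 1)) := by
    intro k hk
    have e1 : ((k : Int) + 1) = ((k + 1 : Nat) : Int) := by push_cast; ring
    have e2 : (((k + 1 : Nat) : Int)) - 1 = ((k : Nat) : Int) := by push_cast; ring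
    rw [e1, e2, PySem.List.pyGetD_natCast, PySem.List.pyGetD_natCast]
    exact Iff.rfl
  constructor
  · intro h
    have hcnt : ∀ i ∈ PySem.List.pyRange 1 (b.length : Int) 1,
        (fun i : Int => decide ((PySem.Int.ofChars? [PySem.List.pyGetD b i ' ']).getD 0
             = (PySem.Int.ofChars? [PySem.List.pyGetD b (i - 1) ' ']).getD 0 - 1)) i = true := by
      rw [← List.countP_eq_length]
      omega
    rw [← pv_Q_iff_P]
    intro k hk
    have hm : ((k : Int) + 1) ∈ PySem.List.pyRange 1 (b.length : Int) 1 := by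
      rw [PySem.List.mem_pyRange_one]
      constructor <;> [omega; (push_cast; omega)]
    have := hcnt _ hm
    simp only [decide_eq_true_eq] at this
    exact (hall k hk).mp this
  · intro hP
    rw [← pv_Q_iff_P] at hP
    have hcnt : ∀ i ∈ PySem.List.pyRange 1 (b.length : Int) 1,
        (fun i : Int => decide ((PySem.Int.ofChars? [PySem.List.pyGetD b i ' ']).getD 0
             = (PySem.Int.ofChars? [PySem.List.pyGetD b (i - 1) ' ']).getD 0 - 1)) i = true := by
      intro i hi
      rw [PySem.List.mem_pyRange_one] at hi
      simp only [decide_eq_true_eq]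
      have hik : i = ((i.toNat - 1 : Nat) : Int) + 1 := by omega
      rw [hik]
      rw [hall (i.toNat - 1) (by omega)]
      exact hP (i.toNat - 1) (by omega)
    rw [List.countP_eq_length.mpr hcnt]
    omega

theorem pv_main (n : Int) (hn : 0 ≤ n) : is_decrementing n = is_decrementing_alt n := by
  unfold is_decrementing is_decrementing_alt
  simp only [PySem.List.slice_zero_start, PySem.List.slice_to_neg_one]
  have hdig0 := pv_toChars_digit hn
  by_cases hc0 : PySem.List.pyGetD (PySem.Int.toChars n) (-1) ' ' = '0'
  all_goals simp only [hc0, if_pos, if_false]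
  case pos =>
    set b := (PySem.Int.toChars n).dropLast with hb
    have hdig : ∀ c ∈ b, pvDigitC c := by
      intro c hc
      exact hdig0 _ (List.mem_of_mem_dropLast hc)
    by_cases hbe : b = []
    · rw [hbe]
      decide
    · rw [if_neg hbe]
      apply Bool.coe_iff_coe.mp
      rw [beq_iff_eq]
      simp only [Bool.if_false_right, Bool.and_true, decide_eq_true_eq]
      rw [pv_A_iff b hbe, pv_B_iff b hdig]
  case neg =>
    set b := PySem.Int.toChars n with hb
    have hbe : b ≠ [] := pv_toChars_ne_nil n
    rw [if_neg hbe]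
    apply Bool.coe_iff_coe.mp
    rw [beq_iff_eq]
    simp only [Bool.if_false_right, Bool.and_true, decide_eq_true_eq]
    rw [pv_A_iff b hbe, pv_B_iff b hdig0]

-- ===== VERDICT (by name: the statement is the Claim_ definition above) =====
theorem is_decrementing_spec : Claim_equal_is_decrementing := by
  intro n _ hpre
  unfold Spec_is_decrementing
  exact pv_main n hpre
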